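-- pv_equiv track=rewrite | github.com/Kirari-Senpai/Katya-Crypt | katya.py | elegant
-- ===== SOURCE A (Python) =====
-- class KatyaException(Exception):
-- 	pass
--
-- def elegant(result=None):
--
-- 	'''
--
-- 	Devuelve cadena con formato elegante.
--
-- 	'''
--
-- 	try:
--
-- 		if (result!=None):
--
-- 			result_elegant = "---- BEGIN KATYA TEXT ENCRYPT ----\n\n"
--
-- 			cont = 0
--
-- 			for block in result:
-- 				if (cont<=60):
-- 					result_elegant += block
-- 					cont+=1
-- 				else:
-- 					result_elegant += '\n'
-- 					cont = 0
--
-- 			result_elegant += "\n\n---- END KATYA TEXT ENCRYPT ----\n"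
--
-- 			return result_elegant
--
-- 		else:
--
-- 			raise KatyaException("There is no message to decorate")
--
-- 	except KatyaException as e:
--
-- 		print (e)
--
-- 	return False
-- ===== SOURCE B (Python) =====
-- def elegant(result=None):
--     if result is None:
--         print("There is no message to decorate")
--         return False
--     parts = []
--     i = 0
--     n = len(result)
--     while i < n:
--         parts.append(result[i:i+61])
--         i += 62
--         if i <= n:
--             parts.append('\n')
--     return ("---- BEGIN KATYA TEXT ENCRYPT ----\n\n"
--             + ''.join(parts)
--             + "\n\n---- END KATYA TEXT ENCRYPT ----\n")
-- ===== Notes on version B (the rewrite author's own statement) =====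
-- stated objective: simpler
-- what changed: Replaces A's per-character loop with a mod-62 counter by a while loop that slices 61-character chunks (skipping the dropped 62nd character) and joins the pieces once.
-- outside the precondition, e.g. on elegant(None): A returns False, B returns False
import Mathlib
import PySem

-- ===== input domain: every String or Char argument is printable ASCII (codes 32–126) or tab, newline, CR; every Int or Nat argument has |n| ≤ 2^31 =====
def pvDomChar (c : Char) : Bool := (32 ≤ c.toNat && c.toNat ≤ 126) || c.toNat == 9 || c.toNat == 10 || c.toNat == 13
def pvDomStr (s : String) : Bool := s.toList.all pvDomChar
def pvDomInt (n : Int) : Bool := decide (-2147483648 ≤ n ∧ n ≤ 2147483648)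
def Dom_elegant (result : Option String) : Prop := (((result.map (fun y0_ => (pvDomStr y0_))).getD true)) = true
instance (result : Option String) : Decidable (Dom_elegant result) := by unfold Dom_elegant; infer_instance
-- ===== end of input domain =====

-- B replaces A's per-character loop with a mod-62 counter by a 62-stride while loop over
-- 61-char slices (objective: simpler). Pre_ excludes `none`, where Python A returns False
-- (not a string) after printing; B does the same there.


def katyaHeader : List Char := "---- BEGIN KATYA TEXT ENCRYPT ----\n\n".toList
def katyaFooter : List Char := "\n\n---- END KATYA TEXT ENCRYPT ----\n".toList

-- ===== PORT A =====
-- A's for-loop: append the char while cont ≤ 60, else append '\n' and reset cont.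
def elegantLoopA (st : List Char × Nat) (block : Char) : List Char × Nat :=
  if st.2 ≤ 60 then (st.1 ++ [block], st.2 + 1) else (st.1 ++ ['\n'], 0)

def elegant (result : Option String) : String :=
  match result with
  | none => ""   -- Python returns False here (excluded by Pre_elegant)
  | some s =>
      let p := s.toList.foldl elegantLoopA (katyaHeader, 0)
      String.ofList (p.1 ++ katyaFooter)

-- ===== PORT B =====
-- B's while loop: parts.append(result[i:i+61]); i += 62; if i <= n: parts.append('\n')
def elegantLoopB (cs : List Char) (i : Nat) : List Char :=
  if _h : i < cs.length then
    PySem.List.slice cs (some (i : Int)) (some ((i : Int) + 61)) ++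
      (if i + 62 ≤ cs.length then '\n' :: elegantLoopB cs (i + 62) else [])
  else []
  termination_by cs.length - i

def elegant_alt (result : Option String) : String :=
  match result with
  | none => ""   -- Python B returns False here (excluded by Pre_elegant)
  | some s =>
      String.ofList (katyaHeader ++ elegantLoopB s.toList 0 ++ katyaFooter)

-- ===== PRECONDITION & SPEC =====
-- Pre_ excludes only `none`: there Python A returns False, not a value of the String return type.
def Pre_elegant (result : Option String) : Prop := result ≠ none
instance (result : Option String) : Decidable (Pre_elegant result) := by unfold Pre_elegant; infer_instance
def pvWitness_elegant : Option String := some "hello"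

def Spec_elegant (result : Option String) (out : String) : Prop := out = elegant_alt result
instance (result : Option String) (out : String) : Decidable (Spec_elegant result out) := by unfold Spec_elegant; infer_instance

-- ===== CLAIM (what is proved, stated in full; the proofs are below) =====
def Claim_equal_elegant : Prop := ∀ (result : Option String), Dom_elegant result → Pre_elegant result → Spec_elegant result (elegant result)

-- ===== LEMMAS AND PROOFS =====

-- Common characterisation: the body with cont = c remaining.
def chunkFrom (c : Nat) : List Char → List Char
  | [] => []
  | ch :: t => if c ≤ 60 then ch :: chunkFrom (c + 1) t else '\n' :: chunkFrom 0 t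

theorem foldA_eq_chunkFrom (l : List Char) : ∀ (acc : List Char) (c : Nat),
    (l.foldl elegantLoopA (acc, c)).1 = acc ++ chunkFrom c l := by
  induction l with
  | nil => intro acc c; simp [chunkFrom]
  | cons ch t ih =>
      intro acc c
      by_cases h : c ≤ 60 <;>
        simp [List.foldl, elegantLoopA, chunkFrom, h, ih]

theorem chunkFrom_closed (l : List Char) : ∀ c : Nat, c ≤ 61 →
    chunkFrom c l = l.take (61 - c) ++
      (if 62 - c ≤ l.length then '\n' :: chunkFrom 0 (l.drop (62 - c)) else []) := by
  induction l with
  | nil => intro c hc; simp [chunkFrom]; omega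
  | cons ch t ih =>
      intro c hc
      by_cases h : c ≤ 60
      · have h1 : 61 - c = (61 - (c+1)) + 1 := by omega
        have h2 : 62 - c = (62 - (c+1)) + 1 := by omega
        rw [chunkFrom, if_pos h, ih (c+1) (by omega), h1, h2]
        simp
      · have hc61 : c = 61 := by omega
        subst hc61
        rw [chunkFrom, if_neg h]
        simp

theorem loopB_eq_chunkFrom (cs : List Char) (i : Nat) :
    elegantLoopB cs i = chunkFrom 0 (cs.drop i) := by
  rw [elegantLoopB]
  by_cases h : i < cs.length
  · rw [dif_pos h]
    have hslice : PySem.List.slice cs (some (i : Int)) (some ((i : Int) + 61)) =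
        (cs.drop i).take 61 := by
      have := PySem.List.slice_natCast_add (xs := cs) (j := i) (n := 61)
      simpa using this
    have hrec : chunkFrom 0 (cs.drop i) = (cs.drop i).take 61 ++
        (if 62 ≤ (cs.drop i).length then '\n' :: chunkFrom 0 ((cs.drop i).drop 62) else []) := by
      simpa using chunkFrom_closed (cs.drop i) 0 (by omega)
    rw [hrec, hslice]
    have hlen : (cs.drop i).length = cs.length - i := by simp
    by_cases h62 : i + 62 ≤ cs.length
    · rw [if_pos h62, if_pos (by omega), loopB_eq_chunkFrom cs (i + 62), List.drop_drop]
    · rw [if_neg h62, if_neg (by omega)]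
  · rw [dif_neg h]
    have : cs.drop i = [] := List.drop_eq_nil_of_le (by omega)
    simp [this, chunkFrom]
  termination_by cs.length - i

-- ===== VERDICT (by name: the statement is the Claim_ definition above) =====
theorem elegant_spec : Claim_equal_elegant := by
  intro result _ hpre
  cases result with
  | none => exact absurd rfl hpre
  | some s =>
      show elegant (some s) = elegant_alt (some s)
      simp only [elegant, elegant_alt]
      rw [foldA_eq_chunkFrom, loopB_eq_chunkFrom]
      simp
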